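-- pv_equiv track=rewrite | github.com/HagaiRaja/Another-Path-Finding-Case | pathFinder.py | pathUtil
-- ===== SOURCE A (Python) =====
-- def pathUtil(i,j,mat,DPmat,boundary) :
--
--     # Base : if i or j is more than size of the matrix (out of the chessboard)
--     if (i >= boundary or j >= boundary) :
--         return 0
--
--     # Base : if i and j is the point where the goals is located
--     if (i == boundary-1 and j == boundary-1) :
--         return 1
--
--     # Using the table of memoization, if already calculated then return its value
--     if (DPmat[i][j] != -1 ) :
--         return DPmat[i][j]
--
--     # Initialize for the DP[i][j]
--     DPmat[i][j] = 0
--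
--     # The recursion of DP
--     for val in range(mat[i][j]+1) :
--         DPmat[i][j] = DPmat[i][j] + pathUtil(i+val,j+(mat[i][j]-val),mat,DPmat,boundary)
--
--     # Return the value from matriks DPmat[i][j]
--     return DPmat[i][j]
-- ===== SOURCE B (Python) =====
-- def pathUtil(i, j, mat, DPmat, boundary):
--     # Bottom-up tabulation over the whole board instead of A's in-place memoized
--     # recursion; equivalence is about the RETURN value only (A mutates DPmat, B does not).
--     b = boundary
--     if i >= b or j >= b:
--         return 0
--     g = [[0] * b for _ in range(b)]
--     for x in reversed(range(b)):
--         for y in reversed(range(b)):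
--             if x == b - 1 and y == b - 1:
--                 g[x][y] = 1
--             elif DPmat[x][y] != -1:
--                 g[x][y] = DPmat[x][y]
--             else:
--                 m = mat[x][y]
--                 total = 0
--                 for v in range(m + 1):
--                     xx = x + v
--                     yy = y + (m - v)
--                     if xx < b and yy < b:
--                         total += g[xx][yy]
--                 g[x][y] = total
--     return g[i][j]
-- ===== Notes on version B (the rewrite author's own statement) =====
-- stated objective: alternative
-- what changed: Replaces A's in-place memoized top-down recursion over DPmat by a pure bottom-up tabulation: a descending row/column sweep fills a fresh table once, leaving the DPmat argument unmutated (equivalence is about the return value; A mutates DPmat, B does not).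
-- outside the precondition, e.g. on pathUtil(-1, 0, [[1, 1], [1, 1]], [[-1, -1], [-1, -1]], 2): A returns 3, B returns 1; on pathUtil(0, 0, [[0, 9, 9], [9, 9, 9], [9, 9, 9]], [[-1], [], []], 3): A returns 0, B raises IndexError
import Mathlib
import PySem

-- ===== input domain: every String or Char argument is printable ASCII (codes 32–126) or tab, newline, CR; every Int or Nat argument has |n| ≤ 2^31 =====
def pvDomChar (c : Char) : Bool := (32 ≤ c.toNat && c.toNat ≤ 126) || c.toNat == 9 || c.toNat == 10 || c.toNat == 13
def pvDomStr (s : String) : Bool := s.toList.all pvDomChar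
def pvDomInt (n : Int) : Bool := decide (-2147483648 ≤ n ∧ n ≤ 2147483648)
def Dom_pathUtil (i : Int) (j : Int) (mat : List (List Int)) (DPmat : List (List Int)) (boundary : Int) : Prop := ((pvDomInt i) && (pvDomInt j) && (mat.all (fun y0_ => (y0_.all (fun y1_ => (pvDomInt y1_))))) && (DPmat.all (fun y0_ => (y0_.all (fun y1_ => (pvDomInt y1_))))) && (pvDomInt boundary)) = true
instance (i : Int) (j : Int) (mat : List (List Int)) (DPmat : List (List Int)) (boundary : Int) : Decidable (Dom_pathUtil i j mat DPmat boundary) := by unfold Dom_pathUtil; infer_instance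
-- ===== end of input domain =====

-- B replaces A's in-place memoized top-down recursion by a pure bottom-up tabulation
-- (descending row/column sweep over a fresh table); equivalence is about the RETURN
-- value only: A mutates DPmat in place, B leaves it untouched.


-- ===== PORT A =====
-- 2-D read g[x][y] / write g[x][y] = v (Python semantics; all accesses made by the
-- programs inside Pre_ are at indices 0 ≤ x,y < boundary ≤ lengths, where pyGetD/pySetD are exact)
def pvGet2 (g : List (List Int)) (x y : Int) : Int :=
  PySem.List.pyGetD (PySem.List.pyGetD g x []) y 0

def pvSet2 (g : List (List Int)) (x y : Int) (v : Int) : List (List Int) :=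
  PySem.List.pySetD g x (PySem.List.pySetD (PySem.List.pyGetD g x []) y v)

-- literal transliteration of A's recursion; fuel only makes the recursion total
-- (pathUtil supplies fuel ≥ the recursion depth, which never exceeds 2*boundary+2)
def pvAEval (mat : List (List Int)) (b : Int) : Nat → Int → Int → List (List Int) → Int × List (List Int)
  | 0, _, _, DP => (0, DP)
  | fuel+1, i, j, DP =>
    if b ≤ i ∨ b ≤ j then (0, DP)
    else if i = b - 1 ∧ j = b - 1 then (1, DP)
    else if pvGet2 DP i j ≠ -1 then (pvGet2 DP i j, DP)
    else
      let DP1 := pvSet2 DP i j 0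
      let DP2 := (PySem.List.pyRange 0 (pvGet2 mat i j + 1) 1).foldl
        (fun DPa v =>
          let acc := pvGet2 DPa i j
          let r := pvAEval mat b fuel (i + v) (j + (pvGet2 mat i j - v)) DPa
          pvSet2 r.2 i j (acc + r.1)) DP1
      (pvGet2 DP2 i j, DP2)

def pathUtil (i : Int) (j : Int) (mat : List (List Int)) (DPmat : List (List Int)) (boundary : Int) : Int :=
  (pvAEval mat boundary ((2 * boundary - i - j).toNat + 2) i j DPmat).1

-- ===== PORT B =====
-- one cell of B's table: target = 1, preset memo value, else sum of in-bounds children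
def pvBCell (g mat DPmat : List (List Int)) (b x y : Int) : Int :=
  if x = b - 1 ∧ y = b - 1 then 1
  else if pvGet2 DPmat x y ≠ -1 then pvGet2 DPmat x y
  else
    (PySem.List.pyRange 0 (pvGet2 mat x y + 1) 1).foldl
      (fun total v =>
        if x + v < b ∧ y + (pvGet2 mat x y - v) < b
        then total + pvGet2 g (x + v) (y + (pvGet2 mat x y - v))
        else total) 0

def pathUtil_alt (i : Int) (j : Int) (mat : List (List Int)) (DPmat : List (List Int)) (boundary : Int) : Int :=
  if boundary ≤ i ∨ boundary ≤ j then 0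
  else
    let g0 := (List.range boundary.toNat).map (fun _ => List.replicate boundary.toNat (0 : Int))
    let g := ((List.range boundary.toNat).reverse.map (fun k => Int.ofNat k)).foldl
      (fun g x => ((List.range boundary.toNat).reverse.map (fun k => Int.ofNat k)).foldl
        (fun g y => pvSet2 g x y (pvBCell g mat DPmat boundary x y)) g) g0
    pvGet2 g i j

-- ===== PRECONDITION & SPEC =====
-- Pre_ restricts to the natural domain: whenever (i,j) is on the board (off-board
-- arguments are admitted unconditionally, both programs return 0 there), the
-- coordinates are non-negative and mat and DPmat have at least boundary rows each of
-- length ≥ boundary.  Excluded (see claim cites): on-board negative i/j, where A's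
-- value comes from Python's negative-index wraparound, and undersized/ragged boards,
-- where A may return touching only reachable cells while B reads every cell (IndexError).
def Pre_pathUtil (i : Int) (j : Int) (mat : List (List Int)) (DPmat : List (List Int)) (boundary : Int) : Prop :=
  i < boundary → j < boundary →
    (0 ≤ i ∧ 0 ≤ j ∧
     boundary ≤ (mat.length : Int) ∧ boundary ≤ (DPmat.length : Int) ∧
     (∀ row ∈ mat, boundary ≤ (row.length : Int)) ∧
     (∀ row ∈ DPmat, boundary ≤ (row.length : Int)))
instance (i : Int) (j : Int) (mat : List (List Int)) (DPmat : List (List Int)) (boundary : Int) : Decidable (Pre_pathUtil i j mat DPmat boundary) := by unfold Pre_pathUtil; infer_instance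

def pvWitness_pathUtil : Int × Int × List (List Int) × List (List Int) × Int :=
  (0, 0, [[1, 1], [1, 1]], [[-1, -1], [-1, -1]], 2)

def Spec_pathUtil (i : Int) (j : Int) (mat : List (List Int)) (DPmat : List (List Int)) (boundary : Int) (out : Int) : Prop := out = pathUtil_alt i j mat DPmat boundary
instance (i : Int) (j : Int) (mat : List (List Int)) (DPmat : List (List Int)) (boundary : Int) (out : Int) : Decidable (Spec_pathUtil i j mat DPmat boundary out) := by unfold Spec_pathUtil; infer_instance

-- ===== CLAIM (what is proved, stated in full; the proofs are below) =====
def Claim_equal_pathUtil : Prop := ∀ (i : Int) (j : Int) (mat : List (List Int)) (DPmat : List (List Int)) (boundary : Int), Dom_pathUtil i j mat DPmat boundary → Pre_pathUtil i j mat DPmat boundary → Spec_pathUtil i j mat DPmat boundary (pathUtil i j mat DPmat boundary)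

-- ===== LEMMAS AND PROOFS =====

-- the common value function both programs compute: fuelled form of the recurrence
def pvVF (mat M : List (List Int)) (b : Int) : Nat → Int → Int → Int
  | 0, _, _ => 0
  | f+1, x, y =>
    if b ≤ x ∨ b ≤ y then 0
    else if x = b - 1 ∧ y = b - 1 then 1
    else if pvGet2 M x y ≠ -1 then pvGet2 M x y
    else if pvGet2 mat x y ≤ 0 then 0
    else (PySem.List.pyRange 0 (pvGet2 mat x y + 1) 1).foldl
      (fun a v => a + pvVF mat M b f (x + v) (y + (pvGet2 mat x y - v))) 0

def pvMeas (b x y : Int) : Nat := (2 * b - x - y).toNat + 2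

def pvV (mat M : List (List Int)) (b x y : Int) : Int := pvVF mat M b (pvMeas b x y) x y

def pvShape (b : Int) (g : List (List Int)) : Prop :=
  b ≤ (g.length : Int) ∧ ∀ row ∈ g, b ≤ (row.length : Int)

-- A's state invariant: every in-bounds non-target cell at coordinate-sum ≥ s holds
-- either its original value (from M) or its final value pvV
def pvInv (mat M : List (List Int)) (b s : Int) (DP : List (List Int)) : Prop :=
  ∀ cx cy : Int, 0 ≤ cx → cx < b → 0 ≤ cy → cy < b → ¬(cx = b - 1 ∧ cy = b - 1) →
    s ≤ cx + cy →
    pvGet2 DP cx cy = pvGet2 M cx cy ∨ pvGet2 DP cx cy = pvV mat M b cx cy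

-- B's sweep invariant: cells after (X,Y) in the descending sweep hold pvV, the rest 0
def pvDone (X Y cx cy : Int) : Prop := X < cx ∨ (cx = X ∧ Y < cy)
def pvInvB (mat M : List (List Int)) (b X Y : Int) (g : List (List Int)) : Prop :=
  ∀ cx cy : Int, 0 ≤ cx → cx < b → 0 ≤ cy → cy < b →
    (pvDone X Y cx cy → pvGet2 g cx cy = pvV mat M b cx cy) ∧
    (¬ pvDone X Y cx cy → pvGet2 g cx cy = 0)

lemma pvGet2_set2_self (b : Int) (g : List (List Int)) (x y : Int)
    (hg : pvShape b g) (hx : 0 ≤ x) (hx2 : x < b) (hy : 0 ≤ y) (hy2 : y < b) (v : Int) :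
    pvGet2 (pvSet2 g x y v) x y = v := by
  obtain ⟨hlen, hrow⟩ := hg
  have hxl : x.toNat < g.length := by omega
  have hyl : y.toNat < (g[x.toNat]'hxl).length := by
    have := hrow _ (List.getElem_mem hxl); omega
  unfold pvSet2 pvGet2
  rw [PySem.List.pyGetD_eq_getElem g [] hx (by omega),
      PySem.List.pySetD_of_nonneg _ _ hy,
      PySem.List.pySetD_of_nonneg _ _ hx,
      PySem.List.pyGetD_eq_getElem _ [] hx (by simpa using by omega : x < ((g.set x.toNat ((g[x.toNat]'hxl).set y.toNat v)).length : Int))]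
  rw [List.getElem_set_self (by simpa using hxl)]
  rw [PySem.List.pyGetD_eq_getElem _ 0 hy (by simpa using by omega : y < (((g[x.toNat]'hxl).set y.toNat v).length : Int))]
  exact List.getElem_set_self (by simpa using hyl)

lemma pvGet2_set2_ne (b : Int) (g : List (List Int)) (x y x' y' : Int)
    (hg : pvShape b g) (hx : 0 ≤ x) (hx2 : x < b) (hy : 0 ≤ y) (hy2 : y < b)
    (hx' : 0 ≤ x') (hx2' : x' < b) (hy' : 0 ≤ y') (hy2' : y' < b)
    (hne : ¬(x' = x ∧ y' = y)) (v : Int) :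
    pvGet2 (pvSet2 g x y v) x' y' = pvGet2 g x' y' := by
  obtain ⟨hlen, hrow⟩ := hg
  have hxl : x.toNat < g.length := by omega
  have hxl' : x'.toNat < g.length := by omega
  have hyl : y.toNat < (g[x.toNat]'hxl).length := by
    have := hrow _ (List.getElem_mem hxl); omega
  have hyl' : y'.toNat < (g[x'.toNat]'hxl').length := by
    have := hrow _ (List.getElem_mem hxl'); omega
  unfold pvSet2 pvGet2
  rw [PySem.List.pyGetD_eq_getElem g [] hx (by omega),
      PySem.List.pySetD_of_nonneg _ _ hy,
      PySem.List.pySetD_of_nonneg _ _ hx,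
      PySem.List.pyGetD_eq_getElem _ [] hx' (by simpa using by omega : x' < ((g.set x.toNat ((g[x.toNat]'hxl).set y.toNat v)).length : Int)),
      PySem.List.pyGetD_eq_getElem g [] hx' (by omega)]
  by_cases hxx : x'.toNat = x.toNat
  · have hxeq : x' = x := by omega
    have hyy : y'.toNat ≠ y.toNat := by
      intro h; exact hne ⟨hxeq, by omega⟩
    have hyb : y' < ((g[x.toNat]'hxl).length : Int) := by
      simp only [hxx] at hyl'; omega
    simp only [hxx]
    rw [List.getElem_set_self (by simpa using hxl)]
    rw [PySem.List.pyGetD_eq_getElem _ 0 hy' (by simpa using by omega : y' < (((g[x.toNat]'hxl).set y.toNat v).length : Int)),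
        PySem.List.pyGetD_eq_getElem (g[x.toNat]'hxl) 0 hy' hyb]
    exact List.getElem_set_ne (fun h => hyy h.symm) _
  · rw [List.getElem_set_ne (fun h => hxx h.symm)]

lemma pvShape_set2 (b : Int) (g : List (List Int)) (x y v : Int)
    (hg : pvShape b g) (hx : 0 ≤ x) (hx2 : x < b) (hy : 0 ≤ y) :
    pvShape b (pvSet2 g x y v) := by
  obtain ⟨hlen, hrow⟩ := hg
  have hxl : x.toNat < g.length := by omega
  unfold pvSet2
  rw [PySem.List.pySetD_of_nonneg _ _ hy, PySem.List.pySetD_of_nonneg _ _ hx,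
      PySem.List.pyGetD_eq_getElem g [] hx (by omega)]
  refine ⟨by simpa using hlen, ?_⟩
  intro row hmem
  rcases List.mem_or_eq_of_mem_set hmem with h | h
  · exact hrow _ h
  · subst h
    have := hrow _ (List.getElem_mem hxl)
    simpa using this

lemma pvMeas_child (b x y m v : Int) (hx2 : x < b) (hy2 : y < b)
    (hm : 1 ≤ m) :
    pvMeas b (x + v) (y + (m - v)) + 1 ≤ pvMeas b x y := by
  unfold pvMeas; omega

lemma pvVF_stable (mat M : List (List Int)) (b : Int) :
    ∀ f1 : Nat, ∀ f2 : Nat, ∀ x y : Int, pvMeas b x y ≤ f1 → pvMeas b x y ≤ f2 →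
    pvVF mat M b f1 x y = pvVF mat M b f2 x y := by
  intro f1
  induction f1 using Nat.strong_induction_on with
  | _ f1 ih =>
    intro f2 x y h1 h2
    have hm : 2 ≤ pvMeas b x y := by unfold pvMeas; omega
    obtain ⟨s1, rfl⟩ : ∃ s, f1 = s + 1 := ⟨f1 - 1, by omega⟩
    obtain ⟨s2, rfl⟩ : ∃ s, f2 = s + 1 := ⟨f2 - 1, by omega⟩
    simp only [pvVF]
    split_ifs with hoob ht hM hm0
    · rfl
    · rfl
    · rfl
    · rfl
    · refine PySem.List.foldl_congr_mem _ _ _ _ ?_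
      intro acc v hv
      rw [PySem.List.mem_pyRange_one] at hv
      congr 1
      have key := pvMeas_child b x y (pvGet2 mat x y) v (by omega) (by omega) (by omega)
      exact ih s1 (by omega) s2 _ _ (by omega) (by omega)

lemma pvV_oob (mat M : List (List Int)) (b x y : Int) (h : b ≤ x ∨ b ≤ y) :
    pvV mat M b x y = 0 := by
  obtain ⟨s, hs⟩ : ∃ s, pvMeas b x y = s + 1 := ⟨pvMeas b x y - 1, by unfold pvMeas; omega⟩
  rw [pvV, hs]
  simp only [pvVF]
  rw [if_pos h]

lemma pvV_target (mat M : List (List Int)) (b x y : Int)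
    (ht : x = b - 1 ∧ y = b - 1) : pvV mat M b x y = 1 := by
  obtain ⟨s, hs⟩ : ∃ s, pvMeas b x y = s + 1 := ⟨pvMeas b x y - 1, by unfold pvMeas; omega⟩
  rw [pvV, hs]
  simp only [pvVF]
  rw [if_neg (by omega), if_pos ht]

lemma pvV_memo (mat M : List (List Int)) (b x y : Int) (hx2 : x < b) (hy2 : y < b)
    (hnt : ¬(x = b - 1 ∧ y = b - 1)) (hM : pvGet2 M x y ≠ -1) :
    pvV mat M b x y = pvGet2 M x y := by
  obtain ⟨s, hs⟩ : ∃ s, pvMeas b x y = s + 1 := ⟨pvMeas b x y - 1, by unfold pvMeas; omega⟩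
  rw [pvV, hs]
  simp only [pvVF]
  rw [if_neg (by omega), if_neg hnt, if_pos hM]

lemma pvV_zero (mat M : List (List Int)) (b x y : Int) (hx2 : x < b) (hy2 : y < b)
    (hnt : ¬(x = b - 1 ∧ y = b - 1)) (hM : pvGet2 M x y = -1)
    (hm : pvGet2 mat x y ≤ 0) : pvV mat M b x y = 0 := by
  obtain ⟨s, hs⟩ : ∃ s, pvMeas b x y = s + 1 := ⟨pvMeas b x y - 1, by unfold pvMeas; omega⟩
  rw [pvV, hs]
  simp only [pvVF]
  rw [if_neg (by omega), if_neg hnt, if_neg (by simpa using hM), if_pos hm]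

lemma pvV_sum (mat M : List (List Int)) (b x y : Int) (hx2 : x < b) (hy2 : y < b)
    (hnt : ¬(x = b - 1 ∧ y = b - 1)) (hM : pvGet2 M x y = -1)
    (hm : 1 ≤ pvGet2 mat x y) :
    pvV mat M b x y =
      (PySem.List.pyRange 0 (pvGet2 mat x y + 1) 1).foldl
        (fun a v => a + pvV mat M b (x + v) (y + (pvGet2 mat x y - v))) 0 := by
  obtain ⟨s, hs⟩ : ∃ s, pvMeas b x y = s + 1 := ⟨pvMeas b x y - 1, by unfold pvMeas; omega⟩
  rw [pvV, hs]
  simp only [pvVF]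
  rw [if_neg (by omega), if_neg hnt, if_neg (by simpa using hM), if_neg (by omega)]
  refine PySem.List.foldl_congr_mem _ _ _ _ ?_
  intro acc v hv
  rw [PySem.List.mem_pyRange_one] at hv
  congr 1
  have key := pvMeas_child b x y (pvGet2 mat x y) v hx2 hy2 hm
  exact pvVF_stable mat M b s (pvMeas b (x + v) (y + (pvGet2 mat x y - v))) _ _ (by omega) (le_refl _)

-- main lemma for A: with enough fuel and a coherent memo state, A's recursion
-- returns pvV, keeps the state coherent, and changes no cell of smaller sum
lemma pvA_main (mat M : List (List Int)) (b : Int) :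
    ∀ fuel : Nat, ∀ x y : Int, ∀ DP : List (List Int),
    0 ≤ x → 0 ≤ y → pvMeas b x y ≤ fuel → pvShape b DP → pvInv mat M b (x + y) DP →
    (pvAEval mat b fuel x y DP).1 = pvV mat M b x y ∧
    pvShape b (pvAEval mat b fuel x y DP).2 ∧
    pvInv mat M b (x + y) (pvAEval mat b fuel x y DP).2 ∧
    (∀ cx cy : Int, 0 ≤ cx → cx < b → 0 ≤ cy → cy < b → cx + cy < x + y →
      pvGet2 (pvAEval mat b fuel x y DP).2 cx cy = pvGet2 DP cx cy) := by
  intro fuel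
  induction fuel using Nat.strong_induction_on with
  | _ fuel ih =>
  intro x y DP hx hy hfuel hDP hinv
  have hm2 : 2 ≤ pvMeas b x y := by unfold pvMeas; omega
  obtain ⟨f', rfl⟩ : ∃ s, fuel = s + 1 := ⟨fuel - 1, by omega⟩
  by_cases hoob : b ≤ x ∨ b ≤ y
  · have heq : pvAEval mat b (f' + 1) x y DP = (0, DP) := by
      simp only [pvAEval]; rw [if_pos hoob]
    rw [heq]
    exact ⟨(pvV_oob mat M b x y hoob).symm, hDP, hinv, fun _ _ _ _ _ _ _ => rfl⟩
  · by_cases ht : x = b - 1 ∧ y = b - 1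
    · have heq : pvAEval mat b (f' + 1) x y DP = (1, DP) := by
        simp only [pvAEval]; rw [if_neg hoob, if_pos ht]
      rw [heq]
      exact ⟨(pvV_target mat M b x y ht).symm, hDP, hinv, fun _ _ _ _ _ _ _ => rfl⟩
    · have hx2 : x < b := by omega
      have hy2 : y < b := by omega
      by_cases hmem : pvGet2 DP x y ≠ -1
      · have heq : pvAEval mat b (f' + 1) x y DP = (pvGet2 DP x y, DP) := by
          simp only [pvAEval]; rw [if_neg hoob, if_neg ht, if_pos hmem]
        rw [heq]
        refine ⟨?_, hDP, hinv, fun _ _ _ _ _ _ _ => rfl⟩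
        rcases hinv x y hx hx2 hy hy2 ht (le_refl _) with h | h
        · rw [h] at hmem ⊢
          exact (pvV_memo mat M b x y hx2 hy2 ht hmem).symm
        · exact h
      · have hfresh : pvGet2 DP x y = -1 := not_ne_iff.mp hmem
        have hM : pvGet2 M x y = -1 := by
          rcases hinv x y hx hx2 hy hy2 ht (le_refl _) with h | h
          · omega
          · by_contra hM'
            have := pvV_memo mat M b x y hx2 hy2 ht hM'
            omega
        have hDP1 : pvShape b (pvSet2 DP x y 0) := pvShape_set2 b DP x y 0 hDP hx hx2 hy
        have hself : pvGet2 (pvSet2 DP x y 0) x y = 0 :=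
          pvGet2_set2_self b DP x y hDP hx hx2 hy hy2 0
        have heq : pvAEval mat b (f' + 1) x y DP =
            (pvGet2 ((PySem.List.pyRange 0 (pvGet2 mat x y + 1) 1).foldl
              (fun DPa v => pvSet2 (pvAEval mat b f' (x + v) (y + (pvGet2 mat x y - v)) DPa).2
                x y (pvGet2 DPa x y + (pvAEval mat b f' (x + v) (y + (pvGet2 mat x y - v)) DPa).1))
              (pvSet2 DP x y 0)) x y,
             (PySem.List.pyRange 0 (pvGet2 mat x y + 1) 1).foldl
              (fun DPa v => pvSet2 (pvAEval mat b f' (x + v) (y + (pvGet2 mat x y - v)) DPa).2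
                x y (pvGet2 DPa x y + (pvAEval mat b f' (x + v) (y + (pvGet2 mat x y - v)) DPa).1))
              (pvSet2 DP x y 0)) := by
          simp only [pvAEval]
          rw [if_neg hoob, if_neg ht, if_neg (not_not.mpr hfresh)]
        by_cases hm1 : 1 ≤ pvGet2 mat x y
        · -- at least one move: run the loop over the children, all of sum x+y+m
          set F : List (List Int) → Int → List (List Int) := fun DPa v =>
            pvSet2 (pvAEval mat b f' (x + v) (y + (pvGet2 mat x y - v)) DPa).2 x y
              (pvGet2 DPa x y + (pvAEval mat b f' (x + v) (y + (pvGet2 mat x y - v)) DPa).1)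
            with hF
          have loop : ∀ vs : List Int, ∀ DPa : List (List Int),
              (∀ v ∈ vs, 0 ≤ v ∧ v ≤ pvGet2 mat x y) → pvShape b DPa →
              pvInv mat M b (x + y + pvGet2 mat x y) DPa →
              pvGet2 (vs.foldl F DPa) x y =
                vs.foldl (fun a v => a + pvV mat M b (x + v) (y + (pvGet2 mat x y - v)))
                  (pvGet2 DPa x y) ∧
              pvShape b (vs.foldl F DPa) ∧
              pvInv mat M b (x + y + pvGet2 mat x y) (vs.foldl F DPa) ∧
              (∀ cx cy : Int, 0 ≤ cx → cx < b → 0 ≤ cy → cy < b →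
                cx + cy < x + y + pvGet2 mat x y → ¬(cx = x ∧ cy = y) →
                pvGet2 (vs.foldl F DPa) cx cy = pvGet2 DPa cx cy) := by
            intro vs
            induction vs with
            | nil => intro DPa _ h1 h2; exact ⟨rfl, h1, h2, fun _ _ _ _ _ _ _ _ => rfl⟩
            | cons v vt ihv =>
              intro DPa hmemv hsh hin
              obtain ⟨hv0, hvm⟩ := hmemv v List.mem_cons_self
              have hcs : (x + v) + (y + (pvGet2 mat x y - v)) = x + y + pvGet2 mat x y := by
                ring
              have hmeasc := pvMeas_child b x y (pvGet2 mat x y) v hx2 hy2 hm1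
              obtain ⟨cval, csh, cinv, cframe⟩ := ih f' (by omega) (x + v)
                (y + (pvGet2 mat x y - v)) DPa (by omega) (by omega) (by omega) hsh
                (by rw [hcs]; exact hin)
              rw [hcs] at cinv cframe
              have hacc : pvGet2 (pvAEval mat b f' (x + v) (y + (pvGet2 mat x y - v)) DPa).2 x y
                  = pvGet2 DPa x y := cframe x y hx hx2 hy hy2 (by omega)
              have hshc : pvShape b (F DPa v) := by
                rw [hF]; exact pvShape_set2 b _ x y _ csh hx hx2 hy
              have hselfc : pvGet2 (F DPa v) x y =
                  pvGet2 DPa x y + pvV mat M b (x + v) (y + (pvGet2 mat x y - v)) := by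
                rw [hF]; dsimp only
                rw [pvGet2_set2_self b _ x y csh hx hx2 hy hy2 _, cval]
              have hinvc : pvInv mat M b (x + y + pvGet2 mat x y) (F DPa v) := by
                intro cx cy h1 h2 h3 h4 h5 h6
                have hne : ¬(cx = x ∧ cy = y) := by omega
                rw [hF]; dsimp only
                rw [pvGet2_set2_ne b _ x y cx cy csh hx hx2 hy hy2 h1 h2 h3 h4 hne]
                exact cinv cx cy h1 h2 h3 h4 h5 h6
              have hframec : ∀ cx cy : Int, 0 ≤ cx → cx < b → 0 ≤ cy → cy < b →
                  cx + cy < x + y + pvGet2 mat x y → ¬(cx = x ∧ cy = y) →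
                  pvGet2 (F DPa v) cx cy = pvGet2 DPa cx cy := by
                intro cx cy h1 h2 h3 h4 h5 h6
                rw [hF]; dsimp only
                rw [pvGet2_set2_ne b _ x y cx cy csh hx hx2 hy hy2 h1 h2 h3 h4 h6]
                exact cframe cx cy h1 h2 h3 h4 h5
              obtain ⟨tval, tsh, tinv, tframe⟩ := ihv (F DPa v)
                (fun w hw => hmemv w (List.mem_cons_of_mem _ hw)) hshc hinvc
              refine ⟨?_, by simpa using tsh, ?_, ?_⟩
              · simp only [List.foldl_cons]
                rw [tval, hselfc]
              · simpa using tinv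
              · intro cx cy h1 h2 h3 h4 h5 h6
                simp only [List.foldl_cons]
                rw [tframe cx cy h1 h2 h3 h4 h5 h6]
                exact hframec cx cy h1 h2 h3 h4 h5 h6
          have hDP1inv : pvInv mat M b (x + y + pvGet2 mat x y) (pvSet2 DP x y 0) := by
            intro cx cy h1 h2 h3 h4 h5 h6
            have hne : ¬(cx = x ∧ cy = y) := by omega
            rw [pvGet2_set2_ne b DP x y cx cy hDP hx hx2 hy hy2 h1 h2 h3 h4 hne]
            exact hinv cx cy h1 h2 h3 h4 h5 (by omega)
          obtain ⟨lval, lsh, linv, lframe⟩ := loop (PySem.List.pyRange 0 (pvGet2 mat x y + 1) 1)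
            (pvSet2 DP x y 0)
            (fun v hv => by rw [PySem.List.mem_pyRange_one] at hv; omega) hDP1 hDP1inv
          rw [hself] at lval
          have hval : pvGet2 ((PySem.List.pyRange 0 (pvGet2 mat x y + 1) 1).foldl F
              (pvSet2 DP x y 0)) x y = pvV mat M b x y := by
            rw [lval]
            exact (pvV_sum mat M b x y hx2 hy2 ht hM hm1).symm
          rw [heq]
          refine ⟨hval, lsh, ?_, ?_⟩
          · intro cx cy h1 h2 h3 h4 h5 h6
            by_cases hc : cx = x ∧ cy = y
            · obtain ⟨rfl, rfl⟩ := hc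
              right
              exact hval
            · by_cases hcs2 : x + y + pvGet2 mat x y ≤ cx + cy
              · exact linv cx cy h1 h2 h3 h4 h5 hcs2
              · rw [lframe cx cy h1 h2 h3 h4 (by omega) hc,
                    pvGet2_set2_ne b DP x y cx cy hDP hx hx2 hy hy2 h1 h2 h3 h4 hc]
                exact hinv cx cy h1 h2 h3 h4 h5 h6
          · intro cx cy h1 h2 h3 h4 h5
            have hc : ¬(cx = x ∧ cy = y) := by omega
            rw [lframe cx cy h1 h2 h3 h4 (by omega) hc,
                pvGet2_set2_ne b DP x y cx cy hDP hx hx2 hy hy2 h1 h2 h3 h4 hc]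
        · by_cases hm0 : pvGet2 mat x y = 0
          · -- the only move is the self-move, answered by the freshly written memo 0
            rw [hm0] at heq
            have hR : PySem.List.pyRange 0 ((0 : Int) + 1) 1 = [0] := by decide
            rw [hR] at heq
            simp only [List.foldl_cons, List.foldl_nil, add_zero, sub_zero] at heq
            have hf1 : 1 ≤ f' := by omega
            obtain ⟨f'', rfl⟩ : ∃ s, f' = s + 1 := ⟨f' - 1, by omega⟩
            have hr : pvAEval mat b (f'' + 1) x y (pvSet2 DP x y 0) =
                (pvGet2 (pvSet2 DP x y 0) x y, pvSet2 DP x y 0) := by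
              simp only [pvAEval]
              rw [if_neg hoob, if_neg ht, if_pos (by rw [hself]; decide)]
            rw [hr, hself, add_zero] at heq
            have hDPX : pvShape b (pvSet2 (pvSet2 DP x y 0) x y 0) :=
              pvShape_set2 b _ x y 0 hDP1 hx hx2 hy
            have hselfX : pvGet2 (pvSet2 (pvSet2 DP x y 0) x y 0) x y = 0 :=
              pvGet2_set2_self b _ x y hDP1 hx hx2 hy hy2 0
            have hV0 : pvV mat M b x y = 0 :=
              pvV_zero mat M b x y hx2 hy2 ht hM (by omega)
            rw [heq]
            refine ⟨by rw [hselfX, hV0], hDPX, ?_, ?_⟩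
            · intro cx cy h1 h2 h3 h4 h5 h6
              by_cases hc : cx = x ∧ cy = y
              · obtain ⟨rfl, rfl⟩ := hc
                right
                rw [hselfX, hV0]
              · rw [pvGet2_set2_ne b _ x y cx cy hDP1 hx hx2 hy hy2 h1 h2 h3 h4 hc,
                    pvGet2_set2_ne b DP x y cx cy hDP hx hx2 hy hy2 h1 h2 h3 h4 hc]
                exact hinv cx cy h1 h2 h3 h4 h5 h6
            · intro cx cy h1 h2 h3 h4 h5
              have hc : ¬(cx = x ∧ cy = y) := by omega
              rw [pvGet2_set2_ne b _ x y cx cy hDP1 hx hx2 hy hy2 h1 h2 h3 h4 hc,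
                  pvGet2_set2_ne b DP x y cx cy hDP hx hx2 hy hy2 h1 h2 h3 h4 hc]
          · -- negative entry: no moves at all, the memo stays 0
            rw [PySem.List.pyRange_one_eq_nil (by omega)] at heq
            simp only [List.foldl_nil] at heq
            have hV0 : pvV mat M b x y = 0 :=
              pvV_zero mat M b x y hx2 hy2 ht hM (by omega)
            rw [heq]
            refine ⟨by rw [hself, hV0], hDP1, ?_, ?_⟩
            · intro cx cy h1 h2 h3 h4 h5 h6
              by_cases hc : cx = x ∧ cy = y
              · obtain ⟨rfl, rfl⟩ := hc
                right
                rw [hself, hV0]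
              · rw [pvGet2_set2_ne b DP x y cx cy hDP hx hx2 hy hy2 h1 h2 h3 h4 hc]
                exact hinv cx cy h1 h2 h3 h4 h5 h6
            · intro cx cy h1 h2 h3 h4 h5
              have hc : ¬(cx = x ∧ cy = y) := by omega
              rw [pvGet2_set2_ne b DP x y cx cy hDP hx hx2 hy hy2 h1 h2 h3 h4 hc]


lemma pvB_cell (mat M : List (List Int)) (b : Int) (g : List (List Int)) (x y : Int)
    (hx : 0 ≤ x) (hx2 : x < b) (hy : 0 ≤ y) (hy2 : y < b)
    (hinv : pvInvB mat M b x y g) :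
    pvBCell g mat M b x y = pvV mat M b x y := by
  unfold pvBCell
  split_ifs with ht hM
  · exact (pvV_target mat M b x y ht).symm
  · exact (pvV_memo mat M b x y hx2 hy2 ht hM).symm
  · have hMeq : pvGet2 M x y = -1 := by simpa using hM
    by_cases hm : 1 ≤ pvGet2 mat x y
    · rw [pvV_sum mat M b x y hx2 hy2 ht hMeq hm]
      refine PySem.List.foldl_congr_mem _ _ _ _ ?_
      intro acc v hv
      rw [PySem.List.mem_pyRange_one] at hv
      by_cases hb : x + v < b ∧ y + (pvGet2 mat x y - v) < b
      · rw [if_pos hb]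
        congr 1
        exact (hinv _ _ (by omega) hb.1 (by omega) hb.2).1 (by unfold pvDone; omega)
      · rw [if_neg hb, pvV_oob mat M b _ _ (by omega)]
        omega
    · rw [pvV_zero mat M b x y hx2 hy2 ht hMeq (by omega)]
      by_cases hm0 : pvGet2 mat x y = 0
      · rw [hm0]
        have hr : PySem.List.pyRange 0 ((0:Int) + 1) 1 = [0] := by decide
        rw [hr]
        simp only [List.foldl_cons, List.foldl_nil, add_zero, sub_zero]
        rw [if_pos ⟨hx2, hy2⟩, zero_add]
        exact (hinv x y hx hx2 hy hy2).2 (by unfold pvDone; omega)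
      · rw [PySem.List.pyRange_one_eq_nil (by omega)]
        rfl

lemma pvB_set (mat M : List (List Int)) (b : Int) (g : List (List Int)) (x y : Int)
    (hg : pvShape b g) (hx : 0 ≤ x) (hx2 : x < b) (hy : 0 ≤ y) (hy2 : y < b)
    (hinv : pvInvB mat M b x y g) :
    pvInvB mat M b x (y - 1) (pvSet2 g x y (pvV mat M b x y)) := by
  intro cx cy hcx hcx2 hcy hcy2
  by_cases hc : cx = x ∧ cy = y
  · obtain ⟨rfl, rfl⟩ := hc
    constructor
    · intro _
      exact pvGet2_set2_self b g cx cy hg hcx hcx2 hcy hcy2 _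
    · intro hnd
      exact absurd (Or.inr ⟨rfl, by omega⟩) hnd
  · rw [pvGet2_set2_ne b g x y cx cy hg hx hx2 hy hy2 hcx hcx2 hcy hcy2 hc]
    constructor
    · intro hd
      exact (hinv cx cy hcx hcx2 hcy hcy2).1 (by unfold pvDone at *; omega)
    · intro hnd
      exact (hinv cx cy hcx hcx2 hcy hcy2).2 (by unfold pvDone at *; omega)

lemma pvB_shift (mat M : List (List Int)) (b xI : Int) (g : List (List Int))
    (h : pvInvB mat M b xI (-1) g) : pvInvB mat M b (xI - 1) (b - 1) g := by
  intro cx cy hcx hcx2 hcy hcy2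
  constructor
  · intro hd
    exact (h cx cy hcx hcx2 hcy hcy2).1 (by unfold pvDone at *; omega)
  · intro hnd
    exact (h cx cy hcx hcx2 hcy hcy2).2 (by unfold pvDone at *; omega)

lemma pvB_inner (mat M : List (List Int)) (b xI : Int) (hx : 0 ≤ xI) (hx2 : xI < b) :
    ∀ n : Nat, (n : Int) ≤ b → ∀ g, pvShape b g → pvInvB mat M b xI ((n : Int) - 1) g →
    pvShape b (((List.range n).reverse.map (fun k => Int.ofNat k)).foldl
      (fun g y => pvSet2 g xI y (pvBCell g mat M b xI y)) g) ∧
    pvInvB mat M b xI (-1) (((List.range n).reverse.map (fun k => Int.ofNat k)).foldl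
      (fun g y => pvSet2 g xI y (pvBCell g mat M b xI y)) g) := by
  intro n
  induction n with
  | zero =>
    intro _ g hg hinv
    refine ⟨hg, ?_⟩
    have e : ((0:Nat):Int) - 1 = -1 := by norm_num
    rwa [e] at hinv
  | succ n ih =>
    intro hn g hg hinv
    have e : ((n+1:Nat):Int) - 1 = (n:Int) := by push_cast; ring
    rw [e] at hinv
    rw [List.range_succ, List.reverse_append]
    simp only [List.reverse_cons, List.reverse_nil, List.nil_append, List.cons_append,
      List.map_cons, List.foldl_cons]
    rw [pvB_cell mat M b g xI (Int.ofNat n) hx hx2 (by simp only [Int.ofNat_eq_natCast]; positivity) (by simp only [Int.ofNat_eq_natCast]; omega)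
      (by exact hinv)]
    refine ih (by omega) _ (pvShape_set2 b g xI (Int.ofNat n) _ hg hx hx2 (by simp only [Int.ofNat_eq_natCast]; positivity)) ?_
    exact pvB_set mat M b g xI (Int.ofNat n) hg hx hx2 (by simp only [Int.ofNat_eq_natCast]; positivity) (by simp only [Int.ofNat_eq_natCast]; omega) (by exact hinv)

lemma pvB_outer (mat M : List (List Int)) (b : Int) (hb : 0 < b) :
    ∀ n : Nat, (n : Int) ≤ b → ∀ g, pvShape b g → pvInvB mat M b ((n : Int) - 1) (b - 1) g →
    pvShape b (((List.range n).reverse.map (fun k => Int.ofNat k)).foldl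
      (fun g x => ((List.range b.toNat).reverse.map (fun k => Int.ofNat k)).foldl
        (fun g y => pvSet2 g x y (pvBCell g mat M b x y)) g) g) ∧
    pvInvB mat M b (-1) (b - 1) (((List.range n).reverse.map (fun k => Int.ofNat k)).foldl
      (fun g x => ((List.range b.toNat).reverse.map (fun k => Int.ofNat k)).foldl
        (fun g y => pvSet2 g x y (pvBCell g mat M b x y)) g) g) := by
  intro n
  induction n with
  | zero =>
    intro _ g hg hinv
    refine ⟨hg, ?_⟩
    have e : ((0:Nat):Int) - 1 = -1 := by norm_num
    rwa [e] at hinv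
  | succ n ih =>
    intro hn g hg hinv
    have e : ((n+1:Nat):Int) - 1 = (n:Int) := by push_cast; ring
    rw [e] at hinv
    rw [List.range_succ, List.reverse_append]
    simp only [List.reverse_cons, List.reverse_nil, List.nil_append, List.cons_append,
      List.map_cons, List.foldl_cons]
    have hin := pvB_inner mat M b (Int.ofNat n) (by simp only [Int.ofNat_eq_natCast]; positivity) (by simp only [Int.ofNat_eq_natCast]; omega) b.toNat (by omega) g hg
      (by show pvInvB mat M b _ ((b.toNat : Int) - 1) g
          have eb : ((b.toNat : Nat) : Int) - 1 = b - 1 := by omega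
          rw [eb]; exact hinv)
    exact ih (by omega) _ hin.1 (by exact pvB_shift mat M b (Int.ofNat n) _ hin.2)

lemma pvG0_shape (b : Int) (hb : 0 < b) :
    pvShape b ((List.range b.toNat).map (fun _ => List.replicate b.toNat (0 : Int))) := by
  constructor
  · simp only [List.length_map, List.length_range]
    omega
  · intro row hmem
    simp only [List.mem_map] at hmem
    obtain ⟨a, _, rfl⟩ := hmem
    simp only [List.length_replicate]
    omega

lemma pvG0_zero (b : Int) (cx cy : Int) (hx : 0 ≤ cx) (hx2 : cx < b) (hy : 0 ≤ cy) (hy2 : cy < b) :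
    pvGet2 ((List.range b.toNat).map (fun _ => List.replicate b.toNat (0 : Int))) cx cy = 0 := by
  unfold pvGet2
  rw [PySem.List.pyGetD_eq_getElem _ [] hx (by simp; omega)]
  rw [List.getElem_map]
  rw [PySem.List.pyGetD_eq_getElem _ 0 hy (by simp; omega)]
  simp

-- ===== VERDICT (by name: the statement is the Claim_ definition above) =====
theorem pathUtil_spec : Claim_equal_pathUtil := by
  intro i j mat DPmat boundary _hdom hpre
  unfold Spec_pathUtil pathUtil pathUtil_alt
  by_cases hoob : boundary ≤ i ∨ boundary ≤ j
  · have heq : pvAEval mat boundary ((2 * boundary - i - j).toNat + 2) i j DPmat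
        = (0, DPmat) := by
      simp only [pvAEval]; rw [if_pos hoob]
    rw [heq, if_pos hoob]
  · rw [if_neg hoob]
    have hi2 : i < boundary := by omega
    have hj2 : j < boundary := by omega
    obtain ⟨hi, hj, hs1, hs2, hs3, hs4⟩ := hpre hi2 hj2
    have hb : 0 < boundary := by omega
    have hDP : pvShape boundary DPmat := ⟨hs2, hs4⟩
    have hA := pvA_main mat DPmat boundary ((2 * boundary - i - j).toNat + 2) i j DPmat
      hi hj (by unfold pvMeas; omega) hDP (fun _ _ _ _ _ _ _ _ => Or.inl rfl)
    have hstart : pvInvB mat DPmat boundary ((boundary.toNat : Int) - 1) (boundary - 1)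
        ((List.range boundary.toNat).map (fun _ => List.replicate boundary.toNat (0 : Int))) := by
      intro cx cy h1 h2 h3 h4
      constructor
      · intro hd
        exfalso
        unfold pvDone at hd
        omega
      · intro _
        exact pvG0_zero boundary cx cy h1 h2 h3 h4
    have hout := pvB_outer mat DPmat boundary hb boundary.toNat (by omega)
      ((List.range boundary.toNat).map (fun _ => List.replicate boundary.toNat (0 : Int)))
      (pvG0_shape boundary hb) hstart
    have hB := (hout.2 i j hi hi2 hj hj2).1 (by unfold pvDone; omega)
    show (pvAEval mat boundary ((2 * boundary - i - j).toNat + 2) i j DPmat).1 = _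
    rw [hA.1, hB]
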